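-- pv_equiv track=rewrite | github.com/phj1120/TIL | y22/m06/d27/change124.py | solution
-- ===== SOURCE A (Python) =====
-- def solution(n):
--     quotient, remainder = divmod(n, 3)
--
--     if remainder == 0:
--         remainder = 4
--         quotient -= 1
--
--     if n <= 3:
--         return str(remainder)
--     else:
--         return solution(quotient) + str(remainder)
-- ===== SOURCE B (Python) =====
-- def solution(n):
--     # bijective base-3: shift by 1, take digit from table, no borrow branch needed
--     out = []
--     while True:
--         n, d = divmod(n - 1, 3)
--         out.append("124"[d])
--         if n <= 0:
--             break
--     return "".join(reversed(out))
-- ===== Notes on version B (the rewrite author's own statement) =====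
-- stated objective: alternative
-- what changed: Treats the task as bijective base-3: a loop on divmod(n-1,3) with a '124' digit-table lookup (no remainder-zero borrow branch), collecting digits in a list and joining once at the end, instead of A's recursion with per-call borrow adjustment and string concatenation.
import Mathlib
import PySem

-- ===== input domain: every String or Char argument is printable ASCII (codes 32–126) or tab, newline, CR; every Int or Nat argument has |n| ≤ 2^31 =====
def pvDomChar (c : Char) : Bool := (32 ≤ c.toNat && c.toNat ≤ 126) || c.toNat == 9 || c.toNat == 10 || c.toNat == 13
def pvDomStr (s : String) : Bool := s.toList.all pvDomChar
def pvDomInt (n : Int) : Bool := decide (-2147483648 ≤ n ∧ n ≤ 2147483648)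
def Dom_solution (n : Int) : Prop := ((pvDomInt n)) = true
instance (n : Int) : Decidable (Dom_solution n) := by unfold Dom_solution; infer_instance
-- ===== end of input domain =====

-- B recasts the task as bijective base-3 with a digit table, replacing A's
-- recursion + borrow branch; objective: alternative decomposition (same cost).

-- ===== PORT A =====
-- recursive, exactly A's structure: divmod, borrow on remainder 0, recurse on quotient
def solution (n : Int) : String :=
  let q0 := PySem.Int.floordiv n 3
  let r0 := PySem.Int.mod n 3
  let q := if r0 = 0 then q0 - 1 else q0
  let r := if r0 = 0 then (4 : Int) else r0
  if n ≤ 3 then PySem.Int.toStr r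
  else solution q ++ PySem.Int.toStr r
termination_by n.toNat
decreasing_by
  have h3 : PySem.Int.floordiv n 3 = n / 3 := PySem.Int.floordiv_eq_ediv_of_pos (by omega)
  split <;> rw [h3] at * <;> omega

-- ===== PORT B =====
-- Source B's loop: n,d = divmod(n-1,3); append "124"[d]; stop when n <= 0.
-- "124"[d] is ported with pyGet?; d = (n-1) mod 3 is always in range 0..2,
-- so the .getD "" default is never taken.
def solutionAltLoop (n : Int) (out : List String) : List String :=
  let n' := PySem.Int.floordiv (n - 1) 3
  let d := PySem.Int.mod (n - 1) 3
  let out' := out ++ [((PySem.Str.pyGet? "124" d).map String.singleton).getD ""]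
  if n' ≤ 0 then out' else solutionAltLoop n' out'
termination_by n.toNat
decreasing_by
  have h3 : PySem.Int.floordiv (n - 1) 3 = (n - 1) / 3 := PySem.Int.floordiv_eq_ediv_of_pos (by omega)
  omega

-- "".join(reversed(out))
def solution_alt (n : Int) : String := String.join (solutionAltLoop n []).reverse

-- ===== PRECONDITION & SPEC =====
def Spec_solution (n : Int) (out : String) : Prop := out = solution_alt n
instance (n : Int) (out : String) : Decidable (Spec_solution n out) := by unfold Spec_solution; infer_instance

-- ===== CLAIM (what is proved, stated in full; the proofs are below) =====
def Claim_equal_solution : Prop := ∀ (n : Int), Dom_solution n → Spec_solution n (solution n)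

-- ===== LEMMAS AND PROOFS =====

-- String.join distributes over list append
theorem pv_foldl_str (s : String) (l : List String) :
    l.foldl (· ++ ·) s = s ++ l.foldl (· ++ ·) "" := by
  induction l generalizing s with
  | nil => simp
  | cons a l ih => rw [List.foldl_cons, List.foldl_cons, ih, ih ("" ++ a)]; simp [String.append_assoc]

theorem pv_join_append (xs ys : List String) :
    String.join (xs ++ ys) = String.join xs ++ String.join ys := by
  rw [String.join, String.join, String.join, List.foldl_append, pv_foldl_str]

theorem pv_join_singleton (s : String) : String.join [s] = s := by
  simp [String.join]

-- the accumulator only collects: the loop's output is the accumulator followed by the empty-start run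
theorem solutionAltLoop_append (n : Int) (out : List String) :
    solutionAltLoop n out = out ++ solutionAltLoop n [] := by
  have hfd : PySem.Int.floordiv (n - 1) 3 = (n - 1) / 3 := PySem.Int.floordiv_eq_ediv_of_pos (by omega)
  rw [solutionAltLoop.eq_def, solutionAltLoop.eq_def (out := [])]
  simp only [hfd]
  by_cases h : (n - 1) / 3 ≤ 0
  · rw [if_pos h, if_pos h, List.nil_append]
  · rw [if_neg h, if_neg h, solutionAltLoop_append ((n - 1) / 3) (out ++ [_]),
      solutionAltLoop_append ((n - 1) / 3) ([] ++ [_])]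
    simp only [List.nil_append, List.append_assoc]
termination_by n.toNat
decreasing_by all_goals omega

-- joined, reversed loop output = A's recursive result
theorem solutionAltLoop_eq_solution (n : Int) :
    String.join (solutionAltLoop n []).reverse = solution n := by
  have hfd : PySem.Int.floordiv (n - 1) 3 = (n - 1) / 3 := PySem.Int.floordiv_eq_ediv_of_pos (by omega)
  have hmd : PySem.Int.mod (n - 1) 3 = (n - 1) % 3 := PySem.Int.mod_eq_emod_of_pos (by omega)
  have hfd' : PySem.Int.floordiv n 3 = n / 3 := PySem.Int.floordiv_eq_ediv_of_pos (by omega)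
  have hmd' : PySem.Int.mod n 3 = n % 3 := PySem.Int.mod_eq_emod_of_pos (by omega)
  rw [solutionAltLoop.eq_def, solution.eq_def]
  simp only [hfd, hmd, hfd', hmd']
  -- the digit strings agree: "124"[(n-1)%3] = str(A's remainder)
  have hdig : (Option.map String.singleton (PySem.Str.pyGet? "124" ((n - 1) % 3))).getD ""
      = PySem.Int.toStr (if n % 3 = 0 then (4 : Int) else n % 3) := by
    have h3 : n % 3 = 0 ∨ n % 3 = 1 ∨ n % 3 = 2 := by omega
    rcases h3 with h | h | h
    · have h' : (n - 1) % 3 = 2 := by omega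
      rw [h, h']; decide
    · have h' : (n - 1) % 3 = 0 := by omega
      rw [h, h']; decide
    · have h' : (n - 1) % 3 = 1 := by omega
      rw [h, h']; decide
  -- the recursion arguments agree: (n-1)//3 = A's (possibly borrowed) quotient
  have hq : (n - 1) / 3 = (if n % 3 = 0 then n / 3 - 1 else n / 3) := by
    split <;> omega
  by_cases hn : n ≤ 3
  · have ha : (n - 1) / 3 ≤ 0 := by omega
    rw [if_pos ha, if_pos hn, List.nil_append, hdig, List.reverse_singleton, pv_join_singleton]
  · have ha : ¬ (n - 1) / 3 ≤ 0 := by omega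
    rw [if_neg ha, if_neg hn, solutionAltLoop_append ((n - 1) / 3) ([] ++ [_])]
    simp only [List.nil_append, List.reverse_append, List.reverse_singleton]
    rw [pv_join_append, solutionAltLoop_eq_solution, pv_join_singleton, hdig, hq]
termination_by n.toNat
decreasing_by omega

-- ===== VERDICT (by name: the statement is the Claim_ definition above) =====
theorem solution_spec : Claim_equal_solution := by
  intro n _
  unfold Spec_solution solution_alt
  rw [solutionAltLoop_eq_solution]
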